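-- pv_equiv track=rewrite | github.com/moslem1729/Python | Algorithms/AlgorithmProblems/GenerateDocument.py | remove_item_from_characters
-- ===== SOURCE A (Python) =====
-- def remove_item_from_characters(characters, character):
--     flag = 0
--     new_characters = ""
--     for item in characters:
--         if item == character and flag == 0:
--             flag = flag + 1
--         else:
--             new_characters = new_characters + item
--     return new_characters
-- ===== SOURCE B (Python) =====
-- def remove_item_from_characters(characters, character):
--     i = -1
--     for j, c in enumerate(characters):
--         if c == character:
--             i = j
--             break
--     if i == -1:
--         return characters
--     return characters[:i] + characters[i + 1:]
-- ===== Notes on version B (the rewrite author's own statement) =====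
-- stated objective: simpler
-- what changed: Replaces A's flag-and-accumulator loop (rebuilding the string character by character via repeated concatenation) with an index-then-slice decomposition: find the first matching index, then concatenate two slices (or return the input unchanged).
import Mathlib
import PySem

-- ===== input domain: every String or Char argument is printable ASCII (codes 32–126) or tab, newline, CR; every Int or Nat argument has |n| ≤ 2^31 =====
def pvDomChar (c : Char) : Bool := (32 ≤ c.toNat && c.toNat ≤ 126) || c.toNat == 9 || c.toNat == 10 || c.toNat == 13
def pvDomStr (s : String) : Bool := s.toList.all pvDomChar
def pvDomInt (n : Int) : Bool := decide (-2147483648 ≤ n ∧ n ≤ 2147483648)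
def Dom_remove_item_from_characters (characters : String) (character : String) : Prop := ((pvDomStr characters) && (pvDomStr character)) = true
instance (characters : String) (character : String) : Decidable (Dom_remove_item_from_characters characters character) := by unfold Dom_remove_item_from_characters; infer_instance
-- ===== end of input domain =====

-- B replaces A's flag-and-accumulator rebuild loop with an index-then-slice decomposition (simpler).


-- ===== PORT A =====
-- literal transliteration: flag starts at 0, the loop appends every kept character
def remove_item_from_characters (characters : String) (character : String) : String :=
  let st := characters.toList.foldl
    (fun (st : Int × List Char) item =>
      if [item] = character.toList ∧ st.1 = 0 then (st.1 + 1, st.2)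
      else (st.1, st.2 ++ [item]))
    (0, [])
  String.ofList st.2

-- ===== PORT B =====
-- the scan 'for j, c in enumerate(characters): if c == character: i = j; break' (i starts at -1)
def pvFindIdx (l : List Char) (ch : List Char) (j : Int) : Int :=
  match l with
  | [] => -1
  | c :: cs => if [c] = ch then j else pvFindIdx cs ch (j + 1)

def remove_item_from_characters_alt (characters : String) (character : String) : String :=
  let i := pvFindIdx characters.toList character.toList 0
  if i = -1 then characters
  else String.ofList (PySem.List.slice characters.toList none (some i) ++
                      PySem.List.slice characters.toList (some (i + 1)) none)

-- ===== PRECONDITION & SPEC =====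
def Spec_remove_item_from_characters (characters : String) (character : String) (out : String) : Prop := out = remove_item_from_characters_alt characters character
instance (characters : String) (character : String) (out : String) : Decidable (Spec_remove_item_from_characters characters character out) := by unfold Spec_remove_item_from_characters; infer_instance

-- ===== CLAIM (what is proved, stated in full; the proofs are below) =====
def Claim_equal_remove_item_from_characters : Prop := ∀ (characters : String) (character : String), Dom_remove_item_from_characters characters character → Spec_remove_item_from_characters characters character (remove_item_from_characters characters character)

-- ===== LEMMAS AND PROOFS =====

-- reference recursion: drop the first matching character
def pvRemRec (l : List Char) (ch : List Char) : List Char :=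
  match l with
  | [] => []
  | c :: cs => if [c] = ch then cs else c :: pvRemRec cs ch

-- once the flag is nonzero, A's loop appends everything
theorem pvFoldFlag (ch : List Char) (l : List Char) : ∀ (n : Int) (acc : List Char), n ≠ 0 →
    l.foldl (fun (st : Int × List Char) item =>
      if [item] = ch ∧ st.1 = 0 then (st.1 + 1, st.2)
      else (st.1, st.2 ++ [item])) (n, acc) = (n, acc ++ l) := by
  induction l with
  | nil => intro n acc _; simp
  | cons c cs ih =>
    intro n acc hn
    simp only [List.foldl_cons]
    rw [if_neg (by simp [hn])]
    rw [ih n (acc ++ [c]) hn]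
    simp

-- with flag 0, A's loop computes acc ++ pvRemRec l ch
theorem pvFoldZero (ch : List Char) (l : List Char) : ∀ (acc : List Char),
    (l.foldl (fun (st : Int × List Char) item =>
      if [item] = ch ∧ st.1 = 0 then (st.1 + 1, st.2)
      else (st.1, st.2 ++ [item])) (0, acc)).2 = acc ++ pvRemRec l ch := by
  induction l with
  | nil => intro acc; simp [pvRemRec]
  | cons c cs ih =>
    intro acc
    simp only [List.foldl_cons, pvRemRec]
    by_cases h : [c] = ch
    · rw [if_pos (by simp [h]), if_pos h]
      rw [pvFoldFlag ch cs (0 + 1) acc (by norm_num)]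
    · rw [if_neg (by simp [h]), if_neg h]
      rw [ih (acc ++ [c])]
      simp

theorem pvFindIdx_ge (ch : List Char) (l : List Char) : ∀ (j : Int), 0 ≤ j →
    pvFindIdx l ch j = -1 ∨ j ≤ pvFindIdx l ch j := by
  induction l with
  | nil => intro j _; left; rfl
  | cons c cs ih =>
    intro j hj
    simp only [pvFindIdx]
    by_cases h : [c] = ch
    · right; simp [h]
    · rw [if_neg h]
      rcases ih (j + 1) (by omega) with h1 | h1
      · left; exact h1
      · right; omega

-- B's index-then-slice equals the reference recursion
theorem pvAltList (ch : List Char) (l : List Char) :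
    (if pvFindIdx l ch 0 = -1 then l
     else PySem.List.slice l none (some (pvFindIdx l ch 0)) ++
          PySem.List.slice l (some (pvFindIdx l ch 0 + 1)) none) = pvRemRec l ch := by
  induction l with
  | nil => simp [pvFindIdx, pvRemRec]
  | cons c cs ih =>
    by_cases h : [c] = ch
    · have hi : pvFindIdx (c :: cs) ch 0 = 0 := by simp [pvFindIdx, h]
      rw [hi]
      rw [if_neg (by norm_num)]
      simp only [pvRemRec, if_pos h]
      simp only [PySem.List.slice_to _ (by omega : (0:Int) ≤ (0:Int)), PySem.List.slice_from _ (by omega : (0:Int) ≤ 0 + 1)]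
      simp
    · have hi : pvFindIdx (c :: cs) ch 0 = pvFindIdx cs ch 1 := by simp [pvFindIdx, h]
      -- relate the scan of cs starting at 1 to the scan starting at 0
      have shift : ∀ (m : List Char) (j : Int), 0 ≤ j →
          pvFindIdx m ch (j + 1) = (if pvFindIdx m ch j = -1 then -1 else pvFindIdx m ch j + 1) := by
        intro m
        induction m with
        | nil => intro j _; simp [pvFindIdx]
        | cons d ds ihm =>
          intro j hj
          simp only [pvFindIdx]
          by_cases hd : [d] = ch
          · simp only [if_pos hd]
            rw [if_neg (by omega : ¬ j = -1)]
          · rw [if_neg hd, if_neg hd, ihm (j + 1) (by omega)]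
      have hs := shift cs 0 le_rfl
      norm_num at hs
      rw [hi, hs]
      by_cases h0 : pvFindIdx cs ch 0 = -1
      · rw [if_pos h0, if_pos rfl]
        rw [if_pos h0] at ih
        simp only [pvRemRec]
        rw [if_neg h, ← ih]
      · have hge : 0 ≤ pvFindIdx cs ch 0 := by
          rcases pvFindIdx_ge ch cs 0 le_rfl with h1 | h1
          · exact absurd h1 h0
          · exact h1
        rw [if_neg h0]
        rw [if_neg (by omega)]
        rw [if_neg h0] at ih
        set i0 := pvFindIdx cs ch 0 with hi0
        have hslice1 : PySem.List.slice (c :: cs) none (some (i0 + 1)) =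
            c :: PySem.List.slice cs none (some i0) := by
          simp only [PySem.List.slice_to _ (by omega : (0:Int) ≤ i0 + 1), PySem.List.slice_to _ hge]
          have : (i0 + 1).toNat = i0.toNat + 1 := by omega
          rw [this]; rfl
        have hslice2 : PySem.List.slice (c :: cs) (some (i0 + 1 + 1)) none =
            PySem.List.slice cs (some (i0 + 1)) none := by
          simp only [PySem.List.slice_from _ (by omega : (0:Int) ≤ i0 + 1 + 1), PySem.List.slice_from _ (by omega : (0:Int) ≤ i0 + 1)]
          have : (i0 + 1 + 1).toNat = (i0 + 1).toNat + 1 := by omega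
          rw [this]; rfl
        rw [hslice1, hslice2]
        simp [pvRemRec, h, ← ih]

-- ===== VERDICT (by name: the statement is the Claim_ definition above) =====
theorem remove_item_from_characters_spec : Claim_equal_remove_item_from_characters := by
  intro characters character _
  show remove_item_from_characters characters character = _
  simp only [remove_item_from_characters, remove_item_from_characters_alt]
  rw [pvFoldZero character.toList characters.toList []]
  simp only [List.nil_append]
  rw [← pvAltList character.toList characters.toList]
  by_cases h : pvFindIdx characters.toList character.toList 0 = -1
  · simp [h, String.ofList_toList]
  · simp [h]
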